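-- pv_equiv track=rewrite | github.com/bmanandhar/pyhton_practice | ordered_vowels.py | ordered_vowel_word
-- ===== SOURCE A (Python) =====
-- def ordered_vowel_word(word):
-- 	vowels = 'aeiou'
-- 	last_vowel = ''
-- 	for char in word:
-- 		if char in vowels:
-- 			if char >= last_vowel:
-- 				last_vowel = char
-- 			else:
-- 				return False
-- 	return True
-- ===== SOURCE B (Python) =====
-- def ordered_vowel_word(word):
-- 	vs = [c for c in word if c in 'aeiou']
-- 	return vs == sorted(vs)
-- ===== Notes on version B (the rewrite author's own statement) =====
-- stated objective: simpler
-- what changed: Replaces the stateful short-circuiting scan carrying a last-vowel sentinel with a filter of the vowels followed by a sort-and-compare (vs == sorted(vs)).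
import Mathlib
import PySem

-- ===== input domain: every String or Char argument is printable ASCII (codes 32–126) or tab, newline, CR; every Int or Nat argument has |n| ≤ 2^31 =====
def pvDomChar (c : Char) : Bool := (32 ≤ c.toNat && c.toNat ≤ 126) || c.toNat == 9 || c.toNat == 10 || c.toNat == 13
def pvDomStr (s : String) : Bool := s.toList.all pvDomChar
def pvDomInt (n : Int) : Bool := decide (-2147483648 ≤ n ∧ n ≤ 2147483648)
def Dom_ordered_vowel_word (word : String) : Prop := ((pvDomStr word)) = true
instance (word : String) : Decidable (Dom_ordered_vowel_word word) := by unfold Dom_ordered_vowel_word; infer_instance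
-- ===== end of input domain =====

-- B replaces A's stateful short-circuiting scan with filter-the-vowels then sort-and-compare (simpler).


-- ===== PORT A =====
-- Python's last_vowel starts as '' and 'char >= ""' is always true; the empty-string
-- sentinel is ported as 'none' (exact: every compared string is one char or empty).
def pvGoA : List Char → Option Char → Bool
  | [], _ => true
  | c :: rest, last =>
    if c ∈ ['a','e','i','o','u'] then
      match last with
      | none => pvGoA rest (some c)
      | some l => if c ≥ l then pvGoA rest (some c) else false
    else pvGoA rest last

def ordered_vowel_word (word : String) : Bool := pvGoA word.toList none

-- ===== PORT B =====
def ordered_vowel_word_alt (word : String) : Bool :=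
  let vs := word.toList.filter (fun c => c ∈ ['a','e','i','o','u'])
  vs == PySem.List.sorted vs (fun x => x) false

-- ===== PRECONDITION & SPEC =====
def Spec_ordered_vowel_word (word : String) (out : Bool) : Prop := out = ordered_vowel_word_alt word
instance (word : String) (out : Bool) : Decidable (Spec_ordered_vowel_word word out) := by unfold Spec_ordered_vowel_word; infer_instance

-- ===== CLAIM (what is proved, stated in full; the proofs are below) =====
def Claim_equal_ordered_vowel_word : Prop := ∀ (word : String), Dom_ordered_vowel_word word → Spec_ordered_vowel_word word (ordered_vowel_word word)

-- ===== LEMMAS AND PROOFS =====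

lemma pvGoA_chain : ∀ (l : List Char) (last : Option Char),
    pvGoA l last = true ↔
      List.IsChain (· ≤ ·) (last.toList ++ l.filter (fun c => c ∈ ['a','e','i','o','u']))
  | [], last => by
    cases last <;> simp [pvGoA]
  | c :: rest, last => by
    by_cases hv : c ∈ ['a','e','i','o','u']
    · cases last with
      | none =>
        simp only [pvGoA, hv, if_pos, List.filter_cons, Option.toList, List.nil_append]
        exact (pvGoA_chain rest (some c))
      | some l =>
        have hv' : c = 'a' ∨ c = 'e' ∨ c = 'i' ∨ c = 'o' ∨ c = 'u' := by simpa using hv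
        by_cases hle : c ≥ l
        · rw [show pvGoA (c::rest) (some l) = pvGoA rest (some c) by simp [pvGoA, hv, hle]]
          rw [pvGoA_chain rest (some c)]
          simp [List.filter_cons, hv', List.isChain_cons_cons, hle]
        · rw [show pvGoA (c::rest) (some l) = false by simp [pvGoA, hv, hle]]
          simp only [ge_iff_le, not_le] at hle
          simp [List.filter_cons, hv', List.isChain_cons_cons, not_le.mpr hle]
    · cases last <;>
        simp only [pvGoA, hv, List.filter_cons] <;>
        exact pvGoA_chain rest _

lemma pv_alt_iff (word : String) :
    ordered_vowel_word_alt word = true ↔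
      List.IsChain (· ≤ ·) (word.toList.filter (fun c => c ∈ ['a','e','i','o','u'])) := by
  unfold ordered_vowel_word_alt
  rw [beq_iff_eq, List.isChain_iff_pairwise]
  constructor
  · intro h
    have := PySem.List.sorted_pairwise (xs := word.toList.filter (fun c => c ∈ ['a','e','i','o','u']))
      (key := fun x => x)
    rw [← h] at this
    exact this
  · intro h
    exact (PySem.List.sorted_eq_self_of_pairwise _ _ h).symm

-- ===== VERDICT (by name: the statement is the Claim_ definition above) =====
theorem ordered_vowel_word_spec : Claim_equal_ordered_vowel_word := by
  intro word _
  unfold Spec_ordered_vowel_word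
  have hA := pvGoA_chain word.toList none
  have hB := pv_alt_iff word
  simp only [Option.toList, List.nil_append] at hA
  unfold ordered_vowel_word
  cases h1 : pvGoA word.toList none <;> cases h2 : ordered_vowel_word_alt word <;> simp_all
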